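-- pv_equiv track=rewrite | github.com/muditmahajan21/Competitive_Submissions | Misc./Hackerrank_HackFest_2020/hackerrank.03.py | whoIsTheWinner
-- ===== SOURCE A (Python) =====
-- def whoIsTheWinner(arr):
--     dict = {}
--     for i in range(len(arr)):
--         if arr[i] in dict:
--             dict[arr[i]] += 1
--         else:
--             dict[arr[i]] = 1
--
--     count, count_ans = 0, 0
--
--     for key in dict:
--         if dict[key] % 2 == 1:
--             count_ans += 1
--         if dict[key] > 1:
--             count += 1
--
--     if count_ans % 2 == 0:
--         if count == 0:
--             return "First"
--         else:
--             return "Second"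
--
--     return "First"
-- ===== SOURCE B (Python) =====
-- def whoIsTheWinner(arr):
--     if len(arr) % 2 == 1:
--         return "First"
--     return "First" if len(set(arr)) == len(arr) else "Second"
-- ===== Notes on version B (the rewrite author's own statement) =====
-- stated objective: simpler
-- what changed: Replaces the frequency dictionary and the two-counter key loop by a closed form: the parity of the number of odd-frequency values equals len(arr) % 2, and count==0 is exactly all-distinct, so B just checks len(arr) % 2 and len(set(arr)) == len(arr) (one set build instead of dict counting plus a second pass).
import Mathlib
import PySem

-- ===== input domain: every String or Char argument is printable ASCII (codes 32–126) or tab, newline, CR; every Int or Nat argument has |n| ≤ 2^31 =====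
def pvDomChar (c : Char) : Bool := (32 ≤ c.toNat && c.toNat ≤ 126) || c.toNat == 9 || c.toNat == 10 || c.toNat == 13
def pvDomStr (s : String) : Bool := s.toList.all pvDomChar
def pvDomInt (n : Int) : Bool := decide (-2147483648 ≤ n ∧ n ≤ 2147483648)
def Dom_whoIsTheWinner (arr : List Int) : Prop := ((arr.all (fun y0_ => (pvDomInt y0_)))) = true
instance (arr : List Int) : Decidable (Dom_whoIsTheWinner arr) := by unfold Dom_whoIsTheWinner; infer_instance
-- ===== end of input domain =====

-- B replaces A's frequency dictionary and two-counter key loop by a closed form on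
-- len(arr) % 2 and len(set(arr)) == len(arr); objective: simpler.

-- ===== PORT A =====
def whoIsTheWinner (arr : List Int) : String :=
  -- dict = {}; for i in range(len(arr)): if arr[i] in dict: dict[arr[i]] += 1 else: dict[arr[i]] = 1
  let d := (PySem.List.pyRange 0 (PySem.List.len arr) 1).foldl
    (fun (d : PySem.Dict Int Int) i =>
      let x := PySem.List.pyGetD arr i 0   -- arr[i]; index always in range here
      if d.contains x then d.insert x (d.getD x 0 + 1) else d.insert x 1)
    PySem.Dict.empty
  -- count, count_ans = 0, 0; for key in dict: …
  let s := d.keys.foldl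
    (fun (s : Int × Int) k =>
      let v := d.getD k 0   -- dict[key]; key always present
      ((if v > 1 then s.1 + 1 else s.1),
       (if PySem.Int.mod v 2 == 1 then s.2 + 1 else s.2)))
    (0, 0)
  if PySem.Int.mod s.2 2 == 0 then
    if s.1 == 0 then "First" else "Second"
  else "First"

-- ===== PORT B =====
def whoIsTheWinner_alt (arr : List Int) : String :=
  if arr.length % 2 == 1 then "First"
  else if (PySem.Set.ofList arr).length == arr.length then "First" else "Second"

-- ===== PRECONDITION & SPEC =====
def Spec_whoIsTheWinner (arr : List Int) (out : String) : Prop := out = whoIsTheWinner_alt arr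
instance (arr : List Int) (out : String) : Decidable (Spec_whoIsTheWinner arr out) := by unfold Spec_whoIsTheWinner; infer_instance

-- ===== CLAIM (what is proved, stated in full; the proofs are below) =====
def Claim_equal_whoIsTheWinner : Prop := ∀ (arr : List Int), Dom_whoIsTheWinner arr → Spec_whoIsTheWinner arr (whoIsTheWinner arr)

-- ===== LEMMAS AND PROOFS =====

-- A's first loop builds exactly Counter(arr).
theorem pv_dict_eq_counter (arr : List Int) :
    (PySem.List.pyRange 0 (PySem.List.len arr) 1).foldl
      (fun (d : PySem.Dict Int Int) i =>
        let x := PySem.List.pyGetD arr i 0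
        if d.contains x then d.insert x (d.getD x 0 + 1) else d.insert x 1)
      PySem.Dict.empty = PySem.Dict.counter arr := by
  have hmap := PySem.List.map_pyGetD_pyRange_zero arr 0
  calc (PySem.List.pyRange 0 (PySem.List.len arr) 1).foldl
        (fun (d : PySem.Dict Int Int) i =>
          let x := PySem.List.pyGetD arr i 0
          if d.contains x then d.insert x (d.getD x 0 + 1) else d.insert x 1)
        PySem.Dict.empty
      = ((PySem.List.pyRange 0 (PySem.List.len arr) 1).map
          (fun j => PySem.List.pyGetD arr j 0)).foldl
        (fun (d : PySem.Dict Int Int) x =>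
          if d.contains x then d.insert x (d.getD x 0 + 1) else d.insert x 1)
        PySem.Dict.empty := by rw [List.foldl_map]
    _ = arr.foldl
        (fun (d : PySem.Dict Int Int) x =>
          if d.contains x then d.insert x (d.getD x 0 + 1) else d.insert x 1)
        PySem.Dict.empty := by rw [hmap]
    _ = arr.foldl (fun (d : PySem.Dict Int Int) x => d.insert x (d.getD x 0 + 1))
        PySem.Dict.empty := by
        apply PySem.List.foldl_congr_mem
        intro d x _
        by_cases h : d.contains x = true
        · rw [if_pos h]
        · have h' : d.contains x = false := by simpa using h
          rw [if_neg h, PySem.Dict.getD_of_not_contains d 0 h']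
          norm_num
    _ = PySem.Dict.counter arr := PySem.Dict.foldl_insert_getD_add_one_eq_counter arr

-- sum of a list of naturals, parity: sum ≡ number of odd entries (mod 2)
theorem pv_sum_parity (l : List Nat) :
    l.sum % 2 = (l.countP (fun x => x % 2 == 1)) % 2 := by
  induction l with
  | nil => rfl
  | cons x t ih =>
    simp only [List.sum_cons, List.countP_cons]
    by_cases h : x % 2 = 1
    · simp only [h, beq_self_eq_true, if_true]
      omega
    · have h0 : x % 2 = 0 := by omega
      have hb : ((x % 2 == 1) = true) = False := by simp [h0]
      simp only [hb, if_false]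
      omega

-- sum of positive naturals equals length iff all entries are 1
theorem pv_sum_eq_length_iff (l : List Nat) (hpos : ∀ x ∈ l, 1 ≤ x) :
    l.sum = l.length ↔ ∀ x ∈ l, x = 1 := by
  induction l with
  | nil => simp
  | cons x t ih =>
    have hx := hpos x (by simp)
    have ht : ∀ y ∈ t, 1 ≤ y := fun y hy => hpos y (by simp [hy])
    have hts : t.length ≤ t.sum := List.length_le_sum_of_one_le t ht
    constructor
    · intro h
      simp only [List.sum_cons, List.length_cons] at h
      have hx1 : x = 1 := by omega
      have hsum : t.sum = t.length := by omega
      intro y hy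
      rcases List.mem_cons.mp hy with rfl | hy
      · exact hx1
      · exact ((ih ht).mp hsum) y hy
    · intro h
      simp only [List.sum_cons, List.length_cons]
      have hx1 : x = 1 := h x (by simp)
      have hsum : t.sum = t.length := (ih ht).mpr (fun y hy => h y (by simp [hy]))
      omega

-- the distinct elements of arr, with total count arr.length
theorem pv_set_counts_sum (arr : List Int) :
    ((PySem.Set.ofList arr).map (fun k => arr.count k)).sum = arr.length := by
  have hperm : (PySem.Set.ofList arr).Perm arr.dedup := by
    rw [List.perm_ext_iff_of_nodup (PySem.Set.nodup_ofList arr) (List.nodup_dedup arr)]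
    intro a
    rw [PySem.Set.mem_ofList, List.mem_dedup]
  calc ((PySem.Set.ofList arr).map (fun k => arr.count k)).sum
      = ((arr.dedup).map (fun k => arr.count k)).sum :=
        (hperm.map (fun k => arr.count k)).sum_eq
    _ = arr.length := List.sum_map_count_dedup_eq_length arr

-- parity of the number of odd-frequency values = parity of the length
theorem pv_countP_odd_parity (arr : List Int) :
    ((PySem.Set.ofList arr).countP (fun k => arr.count k % 2 == 1)) % 2
      = arr.length % 2 := by
  have h := pv_sum_parity ((PySem.Set.ofList arr).map (fun k => arr.count k))
  rw [pv_set_counts_sum, List.countP_map] at h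
  exact h.symm

-- no value occurs more than once iff the set has full length
theorem pv_countP_dup_zero_iff (arr : List Int) :
    ((PySem.Set.ofList arr).countP (fun k => 1 < arr.count k)) = 0
      ↔ (PySem.Set.ofList arr).length = arr.length := by
  have hpos : ∀ x ∈ (PySem.Set.ofList arr).map (fun k => arr.count k), 1 ≤ x := by
    intro x hx
    rcases List.mem_map.mp hx with ⟨k, hk, rfl⟩
    exact List.count_pos_iff.mpr ((PySem.Set.mem_ofList arr k).mp hk)
  have hlen : ((PySem.Set.ofList arr).map (fun k => arr.count k)).length
      = (PySem.Set.ofList arr).length := List.length_map _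
  constructor
  · intro h
    have hall : ∀ k ∈ PySem.Set.ofList arr, ¬ (1 < arr.count k) := by
      intro k hk
      have := List.countP_eq_zero.mp h k hk
      simpa using this
    have : ((PySem.Set.ofList arr).map (fun k => arr.count k)).sum
        = ((PySem.Set.ofList arr).map (fun k => arr.count k)).length := by
      rw [(pv_sum_eq_length_iff _ hpos)]
      intro x hx
      rcases List.mem_map.mp hx with ⟨k, hk, rfl⟩
      have h1 := hpos _ hx
      have h2 := hall k hk
      omega
    rw [pv_set_counts_sum, hlen] at this
    omega
  · intro h
    have : ((PySem.Set.ofList arr).map (fun k => arr.count k)).sum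
        = ((PySem.Set.ofList arr).map (fun k => arr.count k)).length := by
      rw [pv_set_counts_sum, hlen, h]
    have hall := (pv_sum_eq_length_iff _ hpos).mp this
    apply List.countP_eq_zero.mpr
    intro k hk
    have h1 := hall (arr.count k) (List.mem_map.mpr ⟨k, hk, rfl⟩)
    simp [h1]

-- A's second loop (over Counter(arr)'s keys) computes the two counters in closed form
theorem pv_loop_eq (arr : List Int) :
    (PySem.Set.ofList arr).foldl
      (fun (s : Int × Int) k =>
        let v := (PySem.Dict.counter arr).getD k 0
        ((if v > 1 then s.1 + 1 else s.1),
         (if PySem.Int.mod v 2 == 1 then s.2 + 1 else s.2)))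
      (0, 0)
    = ((((PySem.Set.ofList arr).countP (fun k => 1 < arr.count k) : Nat) : Int),
       (((PySem.Set.ofList arr).countP (fun k => arr.count k % 2 == 1) : Nat) : Int)) := by
  have hcong := PySem.List.foldl_congr_mem
    (l := PySem.Set.ofList arr) (init := ((0 : Int), (0 : Int)))
    (f := fun (s : Int × Int) k =>
      let v := (PySem.Dict.counter arr).getD k 0
      ((if v > 1 then s.1 + 1 else s.1),
       (if PySem.Int.mod v 2 == 1 then s.2 + 1 else s.2)))
    (g := fun (s : Int × Int) k =>
      ((if ((1 : Int) < (arr.count k : Int)) then s.1 + 1 else s.1),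
       (if (PySem.Int.mod (arr.count k : Int) 2 == 1) then s.2 + 1 else s.2)))
    (by intro s k _; simp [PySem.Dict.getD_counter])
  rw [hcong]
  rw [PySem.List.foldl_prod_mk
        (f := fun (c : Int) k => if ((1 : Int) < (arr.count k : Int)) then c + 1 else c)
        (g := fun (ca : Int) k => if (PySem.Int.mod (arr.count k : Int) 2 == 1) then ca + 1 else ca)]
  rw [PySem.List.foldl_ite_add_one (p := fun k => (1 : Int) < (arr.count k : Int)),
      PySem.List.foldl_if_add_one (p := fun k => PySem.Int.mod (arr.count k : Int) 2 == 1)]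
  have hc : (PySem.Set.ofList arr).countP (fun k => decide ((1 : Int) < (arr.count k : Int)))
      = (PySem.Set.ofList arr).countP (fun k => 1 < arr.count k) := by
    apply List.countP_congr
    intro k _
    constructor <;> intro h <;>
      · simp only [decide_eq_true_eq] at h ⊢
        exact_mod_cast h
  have hca : (PySem.Set.ofList arr).countP (fun k => PySem.Int.mod (arr.count k : Int) 2 == 1)
      = (PySem.Set.ofList arr).countP (fun k => arr.count k % 2 == 1) := by
    apply List.countP_congr
    intro k _
    have hm : PySem.Int.mod (arr.count k : Int) 2 = ((arr.count k % 2 : Nat) : Int) := by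
      exact_mod_cast PySem.Int.mod_natCast (arr.count k) 2
    simp only [hm]
    constructor <;> intro h <;>
      · simp only [beq_iff_eq] at h ⊢
        omega
  rw [hc, hca]
  simp

-- ===== VERDICT (by name: the statement is the Claim_ definition above) =====
theorem whoIsTheWinner_spec : Claim_equal_whoIsTheWinner := by
  intro arr _
  unfold Spec_whoIsTheWinner whoIsTheWinner whoIsTheWinner_alt
  rw [pv_dict_eq_counter]
  simp only [PySem.Dict.keys_counter]
  rw [pv_loop_eq]
  have hpar := pv_countP_odd_parity arr
  have hdup := pv_countP_dup_zero_iff arr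
  set ca := (PySem.Set.ofList arr).countP (fun k => arr.count k % 2 == 1) with hca_def
  set c := (PySem.Set.ofList arr).countP (fun k => 1 < arr.count k) with hc_def
  have hmod : PySem.Int.mod ((ca : Nat) : Int) 2 = ((ca % 2 : Nat) : Int) := by
    exact_mod_cast PySem.Int.mod_natCast ca 2
  by_cases hodd : arr.length % 2 = 1
  · -- count_ans is odd: A's final "First"; B's first branch
    have h1 : ca % 2 = 1 := by rw [hpar]; exact hodd
    have b1 : (PySem.Int.mod ((ca : Nat) : Int) 2 == 0) = false := by
      rw [hmod, h1]; decide
    have b2 : (arr.length % 2 == 1) = true := by rw [hodd]; rfl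
    rw [b1, b2]
    rfl
  · have heven : arr.length % 2 = 0 := by omega
    have h0 : ca % 2 = 0 := by rw [hpar]; exact heven
    have b1 : (PySem.Int.mod ((ca : Nat) : Int) 2 == 0) = true := by
      rw [hmod, h0]; decide
    have b3 : (arr.length % 2 == 1) = false := by rw [heven]; decide
    by_cases hd : c = 0
    · have hlen : (PySem.Set.ofList arr).length = arr.length := hdup.mp hd
      have b2 : (((c : Nat) : Int) == 0) = true := by rw [hd]; decide
      have b4 : ((PySem.Set.ofList arr).length == arr.length) = true := by
        simp [hlen]
      rw [b1, b2, b3, b4]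
      rfl
    · have hlen : (PySem.Set.ofList arr).length ≠ arr.length := fun h => hd (hdup.mpr h)
      have b2 : (((c : Nat) : Int) == 0) = false := by
        simp only [beq_eq_false_iff_ne, ne_eq]
        exact_mod_cast hd
      have b4 : ((PySem.Set.ofList arr).length == arr.length) = false := by
        simp [hlen]
      rw [b1, b2, b3, b4]
      rfl
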